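-- pv_equiv track=rewrite | github.com/koluzh/NEFUschedbot | xlparcer.py | time2period
-- ===== SOURCE A (Python) =====
-- def time2period(time):
--     s = ''
--     for c in time:
--         s = s + c
--         if s == '8':
--             return 1
--         elif s == '9':
--             return 2
--         elif s == '11':
--             return 3
--         elif s == '14':
--             return 4
--         elif s == '15':
--             return 5
--         elif s == '17':
--             return 6
-- ===== SOURCE B (Python) =====
-- _SINGLE = {'8': 1, '9': 2}
-- _DOUBLE = {'11': 3, '14': 4, '15': 5, '17': 6}
--
--
-- def time2period(time):
--     p = _SINGLE.get(time[:1])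
--     if p is not None:
--         return p
--     return _DOUBLE.get(time[:2])
-- ===== Notes on version B (the rewrite author's own statement) =====
-- stated objective: simpler
-- what changed: Replaced the character-accumulation loop with first-match-wins constant-table lookups on the 1- and 2-character prefixes.
import Mathlib
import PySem

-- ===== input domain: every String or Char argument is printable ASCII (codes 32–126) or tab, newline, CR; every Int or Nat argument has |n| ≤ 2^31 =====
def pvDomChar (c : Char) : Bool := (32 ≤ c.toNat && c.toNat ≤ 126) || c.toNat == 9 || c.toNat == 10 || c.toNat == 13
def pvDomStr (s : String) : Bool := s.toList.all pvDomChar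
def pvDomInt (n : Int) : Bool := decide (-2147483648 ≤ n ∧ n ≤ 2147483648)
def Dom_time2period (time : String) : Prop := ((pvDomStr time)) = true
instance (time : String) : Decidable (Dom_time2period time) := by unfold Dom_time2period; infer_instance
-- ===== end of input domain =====

-- B replaces A's character-accumulation loop with constant table lookups on the 1- and 2-char prefixes (simpler).

-- ===== PORT A =====
-- loop 'for c in time' with accumulator s (kept as List Char; Python string concat/compare are exact on the list side)
def time2periodGo : List Char → List Char → Option Int
  | [], _ => none
  | c :: rest, s =>
    let s' := s ++ [c]
    if s' = ['8'] then some 1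
    else if s' = ['9'] then some 2
    else if s' = ['1', '1'] then some 3
    else if s' = ['1', '4'] then some 4
    else if s' = ['1', '5'] then some 5
    else if s' = ['1', '7'] then some 6
    else time2periodGo rest s'

def time2period (time : String) : Option Int := time2periodGo time.toList []

-- ===== PORT B =====
-- the constant dicts _SINGLE and _DOUBLE (keys kept as List Char, matching the list-side string port)
def time2periodSingle : PySem.Dict (List Char) Int := PySem.Dict.mk [(['8'], 1), (['9'], 2)]
def time2periodDouble : PySem.Dict (List Char) Int :=
  PySem.Dict.mk [(['1', '1'], 3), (['1', '4'], 4), (['1', '5'], 5), (['1', '7'], 6)]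

-- _SINGLE.get(time[:1]) or else _DOUBLE.get(time[:2]); time[:k] is time.toList.take k (PySem.Chars.slice_to_natCast)
def time2period_alt (time : String) : Option Int :=
  match time2periodSingle.get? (time.toList.take 1) with
  | some p => some p
  | none => time2periodDouble.get? (time.toList.take 2)

-- ===== PRECONDITION & SPEC =====
def Spec_time2period (time : String) (out : Option Int) : Prop := out = time2period_alt time
instance (time : String) (out : Option Int) : Decidable (Spec_time2period time out) := by unfold Spec_time2period; infer_instance

-- ===== CLAIM (what is proved, stated in full; the proofs are below) =====
def Claim_equal_time2period : Prop := ∀ (time : String), Dom_time2period time → Spec_time2period time (time2period time)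

-- ===== LEMMAS AND PROOFS =====

theorem t2p_get?_nil (x : List Char) : (PySem.Dict.mk ([] : List (List Char × Int))).get? x = none := rfl

-- once the accumulator has length ≥ 2, no further prefix can match and the loop returns None
theorem time2periodGo_long (l : List Char) : ∀ s : List Char, 2 ≤ s.length → time2periodGo l s = none := by
  induction l with
  | nil => intro s _; rfl
  | cons c rest ih =>
    intro s hs
    have hne : ∀ t : List Char, t.length ≤ 2 → s ++ [c] ≠ t := by
      intro t ht h
      have := congrArg List.length h
      simp only [List.length_append, List.length_cons, List.length_nil] at this
      omega
    have h1 := hne ['8'] (by simp)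
    have h2 := hne ['9'] (by simp)
    have h3 := hne ['1', '1'] (by simp)
    have h4 := hne ['1', '4'] (by simp)
    have h5 := hne ['1', '5'] (by simp)
    have h6 := hne ['1', '7'] (by simp)
    simp only [time2periodGo, h1, h2, h3, h4, h5, h6, if_false]
    exact ih (s ++ [c]) (by simp; omega)

-- ===== VERDICT (by name: the statement is the Claim_ definition above) =====
theorem time2period_spec : Claim_equal_time2period := by
  intro time _
  unfold Spec_time2period time2period time2period_alt
  match h : time.toList with
  | [] => rfl
  | [c] =>
    simp only [time2periodGo, List.nil_append, List.take]
    by_cases h8 : c = '8'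
    · subst h8; simp [time2periodSingle, PySem.Dict.get?_mk_cons]
    by_cases h9 : c = '9'
    · subst h9; simp [time2periodSingle, PySem.Dict.get?_mk_cons]
    have h8' : ¬ ('8' = c) := fun he => h8 he.symm
    have h9' : ¬ ('9' = c) := fun he => h9 he.symm
    simp [h8, h9, h8', h9', time2periodSingle, time2periodDouble, PySem.Dict.get?_mk_cons,
      t2p_get?_nil]
  | c1 :: c2 :: rest =>
    simp only [time2periodGo, List.nil_append, List.take]
    by_cases h8 : c1 = '8'
    · subst h8; simp [time2periodSingle, PySem.Dict.get?_mk_cons]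
    by_cases h9 : c1 = '9'
    · subst h9; simp [time2periodSingle, PySem.Dict.get?_mk_cons]
    have h8' : ¬ ('8' = c1) := fun he => h8 he.symm
    have h9' : ¬ ('9' = c1) := fun he => h9 he.symm
    have hlong := time2periodGo_long rest [c1, c2] (by simp)
    by_cases hc1 : c1 = '1'
    · subst hc1
      by_cases k1 : c2 = '1'
      · subst k1; simp [time2periodSingle, time2periodDouble, PySem.Dict.get?_mk_cons, t2p_get?_nil]
      by_cases k4 : c2 = '4'
      · subst k4; simp [time2periodSingle, time2periodDouble, PySem.Dict.get?_mk_cons, t2p_get?_nil]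
      by_cases k5 : c2 = '5'
      · subst k5; simp [time2periodSingle, time2periodDouble, PySem.Dict.get?_mk_cons, t2p_get?_nil]
      by_cases k7 : c2 = '7'
      · subst k7; simp [time2periodSingle, time2periodDouble, PySem.Dict.get?_mk_cons, t2p_get?_nil]
      have k1' : ¬ ('1' = c2) := fun he => k1 he.symm
      have k4' : ¬ ('4' = c2) := fun he => k4 he.symm
      have k5' : ¬ ('5' = c2) := fun he => k5 he.symm
      have k7' : ¬ ('7' = c2) := fun he => k7 he.symm
      simp [k1, k4, k5, k7, k1', k4', k5', k7', hlong, time2periodSingle, time2periodDouble,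
        PySem.Dict.get?_mk_cons, t2p_get?_nil]
    have hc1' : ¬ ('1' = c1) := fun he => hc1 he.symm
    simp [h8, h9, h8', h9', hc1, hc1', hlong, time2periodSingle, time2periodDouble,
      PySem.Dict.get?_mk_cons, t2p_get?_nil]
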